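-- pv_equiv track=rewrite | github.com/NicolasAngleraud/SuperWikt-fr | extract_wiki.py | extract_labels_definition
-- ===== SOURCE A (Python) =====
-- def extract_labels_definition(text):
--     if not text.strip():
--         return None, None
--
--     text = text.strip()
--     labels = set()
--     i = 0
--     n = len(text)
--
--     while i < n and text[i] == '(':
--         end = text.find(')', i)
--         if end == -1:
--             definition = text[i:].replace('(', '').strip()
--             return labels, definition
--         label = text[i+1:end].strip().lower()
--         labels.add(label)
--         i = end + 1
--
--         while i < n and text[i].isspace():
--             i += 1
--
--     definition = text[i:].strip()
--     return labels, definition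
-- ===== SOURCE B (Python) =====
-- def extract_labels_definition(text):
--     t = text.strip()
--     if not t:
--         return None, None
--     labels = set()
--     while t.startswith('('):
--         head, sep, rest = t[1:].partition(')')
--         if not sep:
--             return labels, t.replace('(', '').strip()
--         labels.add(head.strip().lower())
--         t = rest.lstrip()
--     return labels, t.strip()
-- ===== Notes on version B (the rewrite author's own statement) =====
-- stated objective: simpler
-- what changed: A scans with an integer cursor into the whole string (len, find-from-i, slices, a hand-written whitespace-skip loop); B recurses on the remaining suffix itself, using startswith/partition/lstrip so all index bookkeeping disappears.
import Mathlib
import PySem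

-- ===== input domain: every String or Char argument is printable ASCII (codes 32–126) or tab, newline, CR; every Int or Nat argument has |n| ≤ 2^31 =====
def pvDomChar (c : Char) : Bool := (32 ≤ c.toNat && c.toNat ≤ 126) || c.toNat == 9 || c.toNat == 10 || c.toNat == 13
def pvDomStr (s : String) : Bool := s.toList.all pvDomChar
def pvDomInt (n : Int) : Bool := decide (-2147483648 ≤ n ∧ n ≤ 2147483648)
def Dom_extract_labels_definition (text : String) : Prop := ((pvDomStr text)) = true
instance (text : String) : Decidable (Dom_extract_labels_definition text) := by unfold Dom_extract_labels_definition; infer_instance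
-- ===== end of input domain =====

-- B replaces A's index arithmetic (find/slice bookkeeping over the whole string) with
-- head-of-string recursion on the remaining suffix (startswith/partition/lstrip);
-- objective: simpler, same linear cost.

-- ===== PORT A =====
-- inner loop 'while i < n and text[i].isspace(): i += 1' (fuel-guarded; called with fuel = len(text), always enough since i grows)
def pvSkipA (t : List Char) : Nat → Nat → Nat
  | 0, i => i
  | f+1, i =>
    match PySem.List.pyGet? t (i : Int) with
    | some c => if PySem.Chars.isspace c then pvSkipA t f (i+1) else i
    | none => i
-- outer loop 'while i < n and text[i] == "("' (fuel-guarded; called with fuel = len(text), always enough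
-- since i grows by at least 2 per iteration; the fuel-0 value is the loop-exit value, reached only when i >= n)
def pvLoopA (t : List Char) : Nat → PySem.Set String → Nat → Option (List String) × Option String
  | 0, labels, i =>
      (some labels, some (String.ofList (PySem.Chars.strip (PySem.List.slice t (some (i : Int)) none))))
  | f+1, labels, i =>
    if PySem.List.pyGet? t (i : Int) = some '(' then
      let e := PySem.Chars.findFrom t [')'] (i : Int)
      if e = -1 then
        (some labels, some (String.ofList (PySem.Chars.strip
          (PySem.Chars.replace (PySem.List.slice t (some (i : Int)) none) ['('] []))))
      else
        let label := String.ofList (PySem.Chars.lower (PySem.Chars.strip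
          (PySem.List.slice t (some ((i : Int) + 1)) (some e))))
        pvLoopA t f (PySem.Set.add labels label) (pvSkipA t t.length (e.toNat + 1))
    else
      (some labels, some (String.ofList (PySem.Chars.strip (PySem.List.slice t (some (i : Int)) none))))

def extract_labels_definition (text : String) : Option (List String) × Option String :=
  if PySem.Chars.strip text.toList = [] then (none, none)
  else
    let t := PySem.Chars.strip text.toList
    pvLoopA t t.length PySem.Set.empty 0

-- ===== PORT B =====
-- Source B's 'while t.startswith("(")' loop: head, sep, rest = t[1:].partition(')') ported as
-- takeWhile/dropWhile at the first ')'; recursion on the strictly shrinking suffix t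
def pvLoopB (l : List Char) (labels : PySem.Set String) : Option (List String) × Option String :=
  if hh : l.head? = some '(' then
    let head := l.tail.takeWhile (fun c => c != ')')
    match hm : l.tail.dropWhile (fun c => c != ')') with
    | [] =>
        (some labels, some (String.ofList (PySem.Chars.strip (PySem.Chars.replace l ['('] []))))
    | _ :: rest =>
        pvLoopB (PySem.Chars.lstrip rest)
          (PySem.Set.add labels (String.ofList (PySem.Chars.lower (PySem.Chars.strip head))))
  else
    (some labels, some (String.ofList (PySem.Chars.strip l)))
termination_by l.length
decreasing_by
  have h1 : rest.length + 1 ≤ l.tail.length := by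
    have := List.length_dropWhile_le (p := fun c => c != ')') (l := l.tail)
    rw [hm] at this; simpa using this
  have h2 : l ≠ [] := by intro h; rw [h] at hh; simp at hh
  have h3 : l.tail.length + 1 = l.length := by
    cases l with
    | nil => exact absurd rfl h2
    | cons a as => simp
  have h4 := List.length_dropWhile_le (p := PySem.Chars.isspace) (l := rest)
  simp only [PySem.Chars.lstrip]
  omega


def extract_labels_definition_alt (text : String) : Option (List String) × Option String :=
  let t := PySem.Chars.strip text.toList
  if t = [] then (none, none)
  else pvLoopB t PySem.Set.empty

-- ===== PRECONDITION & SPEC =====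
def Spec_extract_labels_definition (text : String) (out : Option (List String) × Option String) : Prop := out = extract_labels_definition_alt text
instance (text : String) (out : Option (List String) × Option String) : Decidable (Spec_extract_labels_definition text out) := by unfold Spec_extract_labels_definition; infer_instance

-- ===== CLAIM (what is proved, stated in full; the proofs are below) =====
def Claim_equal_extract_labels_definition : Prop := ∀ (text : String), Dom_extract_labels_definition text → Spec_extract_labels_definition text (extract_labels_definition text)

-- ===== LEMMAS AND PROOFS =====

-- take/drop of a list at the length of its takeWhile prefix
lemma pv_take_takeWhile (p : Char → Bool) (d : List Char) :
    d.take ((d.takeWhile p).length) = d.takeWhile p := by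
  have h := List.takeWhile_append_dropWhile (p := p) (l := d)
  calc d.take ((d.takeWhile p).length)
      = (d.takeWhile p ++ d.dropWhile p).take ((d.takeWhile p).length) := by rw [h]
    _ = d.takeWhile p := List.take_left
lemma pv_drop_takeWhile (p : Char → Bool) (d : List Char) :
    d.drop ((d.takeWhile p).length) = d.dropWhile p := by
  have h := List.takeWhile_append_dropWhile (p := p) (l := d)
  calc d.drop ((d.takeWhile p).length)
      = (d.takeWhile p ++ d.dropWhile p).drop ((d.takeWhile p).length) := by rw [h]
    _ = d.dropWhile p := List.drop_left

-- the first occurrence of a single character, as the length of a takeWhile prefix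
lemma pv_find_singleton (d : List Char) (c : Char) :
    PySem.Chars.find d [c] =
      if c ∈ d then ((d.takeWhile (fun x => x != c)).length : Int) else -1 := by
  by_cases hc : c ∈ d
  · rw [if_pos hc]
    set p : Char → Bool := fun x => x != c with hp
    set k := (d.takeWhile p).length with hk
    have h0 : 0 ≤ PySem.Chars.find d [c] :=
      (PySem.Chars.find_nonneg_iff _ _).2 ((List.singleton_infix_iff c d).2 hc)
    obtain ⟨hpre, hmin⟩ := PySem.Chars.find_spec h0
    set j := (PySem.Chars.find d [c]).toNat with hj
    have hdw : d.dropWhile p ≠ [] := by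
      intro h
      have := List.dropWhile_eq_nil_iff.mp h
      exact absurd (this c hc) (by simp [hp])
    have hck : [c] <+: d.drop k := by
      rw [hk, pv_drop_takeWhile]
      have h6 := List.head_dropWhile_not p hdw
      cases hd : d.dropWhile p with
      | nil => exact absurd hd hdw
      | cons a as =>
        simp only [hd] at h6
        have : a = c := by simpa [hp] using h6
        simp [this]
    have hjk : j ≤ k := by
      by_contra h
      exact hmin k (by omega) hck
    have hkj : k ≤ j := by
      by_contra h
      have hjlt : j < k := by omega
      have h1 : d[j]? = some c := by
        have hh := List.head?_drop (l := d) (i := j)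
        rcases hpre with ⟨tl, htl⟩
        rw [← hh, ← htl]; simp
      have h2 : (d.takeWhile p)[j]? = some c := by
        rw [← pv_take_takeWhile p d, List.getElem?_take_of_lt hjlt, h1]
      have h3 : c ∈ d.takeWhile p := List.mem_of_getElem? h2
      have := List.mem_takeWhile_imp h3
      simp [hp] at this
    have : j = k := le_antisymm hjk hkj
    omega
  · rw [if_neg hc]
    rw [PySem.Chars.find_eq_neg_one_iff]
    rw [List.singleton_infix_iff]; exact hc

-- A's whitespace-skip loop lands exactly at lstrip of the suffix
lemma pv_skip (t : List Char) : ∀ (f j : Nat), t.length ≤ f + j →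
    j ≤ pvSkipA t f j ∧ t.drop (pvSkipA t f j) = PySem.Chars.lstrip (t.drop j) := by
  intro f
  induction f with
  | zero =>
    intro j hj
    have hd : t.drop j = [] := List.drop_eq_nil_of_le (by omega)
    simp [pvSkipA, hd, PySem.Chars.lstrip]
  | succ f ih =>
    intro j hj
    rw [pvSkipA, PySem.List.pyGet?_natCast]
    cases hg : t[j]? with
    | none =>
      have : t.length ≤ j := by simpa using List.getElem?_eq_none_iff.mp hg
      have hd : t.drop j = [] := List.drop_eq_nil_of_le this
      simp [hd, PySem.Chars.lstrip]
    | some c =>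
      obtain ⟨hjl, hc⟩ := List.getElem?_eq_some_iff.mp hg
      have hdc : t.drop j = c :: t.drop (j+1) := by
        rw [List.drop_eq_getElem_cons hjl, hc]
      by_cases hs : PySem.Chars.isspace c
      · simp only [hs, if_true]
        obtain ⟨h1, h2⟩ := ih (j+1) (by omega)
        refine ⟨by omega, ?_⟩
        rw [h2, hdc]
        simp [PySem.Chars.lstrip, hs]
      · simp only [hs]
        refine ⟨le_refl _, ?_⟩
        rw [hdc]
        simp only [PySem.Chars.lstrip, List.dropWhile_cons, hs]
        exact hdc

-- a nonnegative from-slice is drop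
lemma pv_slice_from (t : List Char) (i : Nat) :
    PySem.List.slice t (some (i : Int)) none = t.drop i := by
  rw [PySem.List.slice_from t (by exact_mod_cast Int.natCast_nonneg i)]
  simp

-- the main-loop correspondence: A at index i equals B on the suffix t.drop i
lemma pv_loop_eq (t : List Char) : ∀ (f : Nat) (labels : PySem.Set String) (i : Nat),
    t.length ≤ f + i → pvLoopA t f labels i = pvLoopB (t.drop i) labels := by
  intro f
  induction f with
  | zero =>
    intro labels i hi
    have hd : t.drop i = [] := List.drop_eq_nil_of_le (by omega)
    rw [pvLoopA, pvLoopB, pv_slice_from, hd]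
    simp
  | succ f ih =>
    intro labels i hi
    rw [pvLoopA, pvLoopB, PySem.List.pyGet?_natCast]
    have hhead : (t.drop i).head? = t[i]? := List.head?_drop
    by_cases hc : t[i]? = some '('
    case neg =>
      rw [if_neg hc, dif_neg (by rw [hhead]; exact hc), pv_slice_from]
    case pos =>
      obtain ⟨hil, hti⟩ := List.getElem?_eq_some_iff.mp hc
      have hdrop : t.drop i = '(' :: t.drop (i+1) := by
        rw [List.drop_eq_getElem_cons hil, hti]
      have htail : (t.drop i).tail = t.drop (i+1) := by rw [hdrop, List.tail_cons]
      rw [if_pos hc, dif_pos (by rw [hhead]; exact hc),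
        PySem.Chars.findFrom_natCast t [')'] i hil.le, pv_find_singleton, pv_slice_from, htail, hdrop]
      set d := t.drop (i+1) with hd
      by_cases hm : ')' ∈ d
      case neg =>
        have hmem : ¬ (')' ∈ '(' :: d) := by simp [hm]
        have hdwnil : d.dropWhile (fun c => c != ')') = [] :=
          List.dropWhile_eq_nil_iff.mpr (fun x hx => by
            simp only [bne_iff_ne, ne_eq]
            intro h; exact hm (h ▸ hx))
        rw [if_neg hmem, if_pos rfl]
        split
        · rfl
        · rename_i heq; rw [hdwnil] at heq; exact absurd heq (by simp)
      case pos =>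
        set p : Char → Bool := fun c => c != ')' with hp
        set k := (d.takeWhile p).length with hk
        have hmem : ')' ∈ '(' :: d := List.mem_cons_of_mem _ hm
        have htw : ('(' :: d).takeWhile p = '(' :: d.takeWhile p := by
          rw [List.takeWhile_cons_of_pos (by simp [hp])]
        have hdw : d.dropWhile p ≠ [] := by
          intro h
          have := List.dropWhile_eq_nil_iff.mp h ')' hm
          simp [hp] at this
        have hkd : k < d.length := by
          have h1 : d.drop k = d.dropWhile p := pv_drop_takeWhile p d
          by_contra h
          rw [List.drop_eq_nil_of_le (by omega)] at h1
          exact hdw h1.symm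
        have hdk : d.dropWhile p = d[k] :: d.drop (k+1) := by
          rw [← pv_drop_takeWhile p d, List.drop_eq_getElem_cons hkd]
        rw [if_pos hmem, htw]
        have hfind : (('(' :: d.takeWhile p).length : Int) ≠ -1 := by
          simp only [List.length_cons]
          omega
        rw [if_neg hfind]
        have he2 : ((i : Int) + ('(' :: d.takeWhile p).length) ≠ -1 := by
          simp only [List.length_cons]
          omega
        rw [if_neg he2]
        -- the label slice is exactly takeWhile p d
        have hslice : PySem.List.slice t (some ((i : Int) + 1))
            (some ((i : Int) + ('(' :: d.takeWhile p).length)) = d.takeWhile p := by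
          have h1 : ((i : Int) + 1) = ((i + 1 : Nat) : Int) := by push_cast; ring
          have h2 : ((i : Int) + ('(' :: d.takeWhile p).length) = ((i + 1 + k : Nat) : Int) := by
            simp only [List.length_cons, ← hk]
            push_cast; ring
          rw [h1, h2, PySem.List.slice_natCast]
          have h3 : i + 1 + k - (i + 1) = k := by omega
          rw [h3, ← hd, pv_take_takeWhile]
        rw [hslice]
        have htn : ((i : Int) + ('(' :: d.takeWhile p).length).toNat + 1 = i + k + 2 := by
          simp only [List.length_cons, ← hk]
          omega
        rw [htn]
        obtain ⟨hge, hdropskip⟩ := pv_skip t t.length (i + k + 2) (by omega)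
        rw [ih _ _ (by omega), hdropskip]
        have hdd : t.drop (i + k + 2) = d.drop (k + 1) := by
          rw [hd, List.drop_drop]
          congr 1
          omega
        rw [hdd]
        split
        · rename_i heq
          rw [hdk] at heq
          exact (List.cons_ne_nil _ _ heq).elim
        · rename_i hhh rest heq
          rw [hdk] at heq
          injection heq with h1 h2
          rw [h2]

-- ===== VERDICT (by name: the statement is the Claim_ definition above) =====
theorem extract_labels_definition_spec : Claim_equal_extract_labels_definition := by
  intro text _
  unfold Spec_extract_labels_definition extract_labels_definition extract_labels_definition_alt
  by_cases h : PySem.Chars.strip text.toList = []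
  · simp [h]
  · simp only [h, if_false]
    have := pv_loop_eq (PySem.Chars.strip text.toList) (PySem.Chars.strip text.toList).length
      PySem.Set.empty 0 (by omega)
    simpa using this
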